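-- pv_equiv track=rewrite | github.com/VolDonets/cmeans_python | cmeans_math/data_preprocessing.py | get_min_vec_from_data_set
-- ===== SOURCE A (Python) =====
-- def get_min_vec_from_data_set(mat_entries):
--     vec_min = []
--     for x in mat_entries[0]:
--         vec_min.append(x)
--
--     for vec_entry in mat_entries:
--         for inx in range(len(vec_entry)):
--             if vec_entry[inx] < vec_min[inx]:
--                 vec_min[inx] = vec_entry[inx]
--
--     return vec_min
-- ===== SOURCE B (Python) =====
-- def get_min_vec_from_data_set(mat_entries):
--     width = len(mat_entries[0])
--     return [min(row[i] for row in mat_entries if i < len(row)) for i in range(width)]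
-- ===== Notes on version B (the rewrite author's own statement) =====
-- stated objective: idiomatic
-- what changed: B builds each output slot directly as the built-in min over the column (skipping rows too short to reach it) in one comprehension, instead of A's copying the first row and relaxing each slot row-by-row with index updates.
-- crash fix: A raises IndexError when some row is longer than the first; B ignores the extra entries and returns the minima over the first row's width. — e.g. on get_min_vec_from_data_set([[1], [2, 3]]): A raises IndexError, B returns [1]
import Mathlib
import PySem

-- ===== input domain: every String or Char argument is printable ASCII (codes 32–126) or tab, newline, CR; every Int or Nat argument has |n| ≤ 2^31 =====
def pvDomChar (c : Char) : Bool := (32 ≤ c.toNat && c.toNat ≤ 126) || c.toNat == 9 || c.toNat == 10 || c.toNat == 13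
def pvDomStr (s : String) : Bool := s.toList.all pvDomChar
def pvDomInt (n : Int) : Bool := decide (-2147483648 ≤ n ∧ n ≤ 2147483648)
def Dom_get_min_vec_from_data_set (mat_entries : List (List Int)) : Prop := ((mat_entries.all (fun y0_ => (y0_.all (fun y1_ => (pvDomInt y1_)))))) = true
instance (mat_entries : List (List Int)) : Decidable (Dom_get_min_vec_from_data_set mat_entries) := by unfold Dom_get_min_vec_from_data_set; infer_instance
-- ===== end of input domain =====

-- B builds each output slot directly as the built-in min over its column (skipping rows too short
-- to reach it) instead of A's row-by-row relaxation of a mutable copy of the first row; same cost,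
-- more idiomatic.

-- ===== PORT A =====
-- one inner-loop step of A: 'if vec_entry[inx] < vec_min[inx]: vec_min[inx] = vec_entry[inx]'
-- (the getD defaults stand for Python's vec_entry[inx]/vec_min[inx]; inx < len(vec_entry) always,
--  and inx < len(vec_min) on every input Pre_ admits, so the defaults are never consulted there)
def pvStep (row : List Int) (vm : List Int) (inx : Nat) : List Int :=
  if row.getD inx 0 < vm.getD inx 0 then vm.set inx (row.getD inx 0) else vm

def pvRelaxRow (vm : List Int) (row : List Int) : List Int :=
  (List.range row.length).foldl (pvStep row) vm

def get_min_vec_from_data_set (mat_entries : List (List Int)) : List Int :=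
  -- 'mat_entries[0]' raises IndexError on []; Pre_ excludes that input, so headD's default is never consulted
  let vec_min := (mat_entries.headD []).foldl (fun acc x => acc ++ [x]) []
  mat_entries.foldl pvRelaxRow vec_min

-- ===== PORT B =====
-- Python's min over a nonempty list ([] never reached: the first row is in every column's list)
def pvColMin : List Int → Int
  | [] => 0
  | h :: t => t.foldl min h

def get_min_vec_from_data_set_alt (mat_entries : List (List Int)) : List Int :=
  -- 'mat_entries[0]' raises IndexError on [] in B too; Pre_ excludes that input
  (List.range (mat_entries.headD []).length).map (fun i =>
    pvColMin ((mat_entries.filter (fun r => decide (i < r.length))).map (fun r => r.getD i 0)))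

-- ===== PRECONDITION & SPEC =====
-- Pre_ excludes exactly the inputs on which A raises IndexError: the empty list (mat_entries[0])
-- and inputs where some row is longer than the first (vec_min[inx] overruns).
def Pre_get_min_vec_from_data_set (mat_entries : List (List Int)) : Prop :=
  mat_entries ≠ [] ∧ ∀ r ∈ mat_entries, r.length ≤ (mat_entries.headD []).length
instance (mat_entries : List (List Int)) : Decidable (Pre_get_min_vec_from_data_set mat_entries) := by
  unfold Pre_get_min_vec_from_data_set; infer_instance

def pvWitness_get_min_vec_from_data_set : List (List Int) := [[3, 1], [2, 5]]

-- A raises IndexError when some row is longer than the first; B ignores the extra entries and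
-- returns the minima over the first row's width.
def Raises_get_min_vec_from_data_set (mat_entries : List (List Int)) : Prop :=
  mat_entries ≠ [] ∧ ∃ r ∈ mat_entries, (mat_entries.headD []).length < r.length
instance (mat_entries : List (List Int)) : Decidable (Raises_get_min_vec_from_data_set mat_entries) := by
  unfold Raises_get_min_vec_from_data_set; infer_instance

def pvRaiseWitness_get_min_vec_from_data_set : List (List Int) := [[1], [2, 3]]
def pvRaiseWitnessOut_get_min_vec_from_data_set : List Int := [1]

def Spec_get_min_vec_from_data_set (mat_entries : List (List Int)) (out : List Int) : Prop := out = get_min_vec_from_data_set_alt mat_entries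
instance (mat_entries : List (List Int)) (out : List Int) : Decidable (Spec_get_min_vec_from_data_set mat_entries out) := by unfold Spec_get_min_vec_from_data_set; infer_instance

-- ===== CLAIM (what is proved, stated in full; the proofs are below) =====
def Claim_equal_get_min_vec_from_data_set : Prop := ∀ (mat_entries : List (List Int)), Dom_get_min_vec_from_data_set mat_entries → Pre_get_min_vec_from_data_set mat_entries → Spec_get_min_vec_from_data_set mat_entries (get_min_vec_from_data_set mat_entries)

def Claim_raises_get_min_vec_from_data_set : Prop := (∀ (mat_entries : List (List Int)), Dom_get_min_vec_from_data_set mat_entries → Raises_get_min_vec_from_data_set mat_entries → ¬ Pre_get_min_vec_from_data_set mat_entries) ∧ (Dom_get_min_vec_from_data_set (pvRaiseWitness_get_min_vec_from_data_set) ∧ Raises_get_min_vec_from_data_set (pvRaiseWitness_get_min_vec_from_data_set) ∧ get_min_vec_from_data_set_alt (pvRaiseWitness_get_min_vec_from_data_set) = pvRaiseWitnessOut_get_min_vec_from_data_set)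

-- ===== LEMMAS AND PROOFS =====

-- pushing an inner-loop step past the head of vec_min (indices shifted by one)
theorem pv_cons_fold (r : Int) (rs : List Int) :
    ∀ (l : List Nat) (h : Int) (t : List Int),
      l.foldl (fun acc i => pvStep (r :: rs) acc (i + 1)) (h :: t)
        = h :: l.foldl (pvStep rs) t := by
  intro l
  induction l with
  | nil => intro h t; rfl
  | cons i l ih =>
    intro h t
    simp only [List.foldl_cons]
    have : pvStep (r :: rs) (h :: t) (i + 1) = h :: pvStep rs t i := by
      simp [pvStep, List.set_cons_succ]
      split_ifs <;> rfl
    rw [this, ih]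

-- A's inner loop: pointwise min with the row on the row's prefix, the tail of vec_min untouched
theorem pv_relax_eq :
    ∀ (row vm : List Int), row.length ≤ vm.length →
      pvRelaxRow vm row = List.zipWith min vm row ++ vm.drop row.length := by
  intro row
  induction row with
  | nil => intro vm _; simp [pvRelaxRow]
  | cons r rs ih =>
    intro vm h
    match vm with
    | [] => simp at h
    | v :: vs =>
      simp only [List.length_cons] at h
      have hlen : rs.length ≤ vs.length := by omega
      simp only [pvRelaxRow, List.length_cons, List.range_succ_eq_map,
        List.foldl_cons, List.foldl_map]
      have h0 : pvStep (r :: rs) (v :: vs) 0 = (min v r) :: vs := by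
        simp [pvStep, min_def]
        split_ifs <;> first | rfl | omega
      rw [h0]
      have := pv_cons_fold r rs (List.range rs.length) (min v r) vs
      simp only [Nat.succ_eq_add_one] at this ⊢
      rw [this]
      have := ih vs hlen
      simp only [pvRelaxRow] at this
      rw [this]
      simp [List.zipWith]

theorem pv_getD_zipWith (as bs : List Int) (i : Nat)
    (h1 : i < as.length) (h2 : i < bs.length) :
    (List.zipWith min as bs).getD i 0 = min (as.getD i 0) (bs.getD i 0) := by
  simp [List.getD_eq_getElem?_getD, List.getElem?_zipWith]
  rw [List.getElem?_eq_getElem h1, List.getElem?_eq_getElem h2]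
  simp

-- the relaxed vector, slot by slot
theorem pv_relax_getD (vm row : List Int) (i : Nat)
    (h : row.length ≤ vm.length) (hi : i < vm.length) :
    (pvRelaxRow vm row).getD i 0
      = if i < row.length then min (vm.getD i 0) (row.getD i 0) else vm.getD i 0 := by
  rw [pv_relax_eq row vm h]
  by_cases hir : i < row.length
  · have hz : i < (List.zipWith min vm row).length := by
      simp [List.length_zipWith]; omega
    simp only [hir, if_pos]
    rw [List.getD_eq_getElem?_getD, List.getElem?_append_left hz,
      ← List.getD_eq_getElem?_getD]
    exact pv_getD_zipWith vm row i hi hir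
  · have hz : (List.zipWith min vm row).length ≤ i := by
      simp [List.length_zipWith]; omega
    simp only [hir, if_neg, not_false_iff]
    rw [List.getD_eq_getElem?_getD, List.getElem?_append_right hz,
      ← List.getD_eq_getElem?_getD]
    have hmin : (List.zipWith min vm row).length = row.length := by
      simp [List.length_zipWith]; omega
    rw [hmin]
    have hidx : row.length + (i - row.length) = i := by omega
    simp [List.getD_eq_getElem?_getD, List.getElem?_drop, hidx]

theorem pv_relax_length (vm row : List Int) (h : row.length ≤ vm.length) :
    (pvRelaxRow vm row).length = vm.length := by
  rw [pv_relax_eq row vm h]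
  simp [List.length_zipWith]
  omega

theorem pv_self_id (l : List Int) :
    l = (List.range l.length).map (fun i => l.getD i 0) := by
  apply List.ext_getElem
  · simp
  · intro i h1 h2
    simp at h2
    simp [List.getD_eq_getElem?_getD, List.getElem?_eq_getElem h2]

-- A's outer fold, slot by slot: each slot folds min over its column, rows too short to reach it skipped
theorem pv_foldA_cols :
    ∀ (rows : List (List Int)) (acc : List Int),
      (∀ r ∈ rows, r.length ≤ acc.length) →
      rows.foldl pvRelaxRow acc
        = (List.range acc.length).map (fun i =>
            ((rows.filter (fun r => decide (i < r.length))).map (fun r => r.getD i 0)).foldl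
              min (acc.getD i 0)) := by
  intro rows
  induction rows with
  | nil => intro acc _; simpa using pv_self_id acc
  | cons r rest ih =>
    intro acc hlen
    have hr : r.length ≤ acc.length := hlen r (by simp)
    have hacc : (pvRelaxRow acc r).length = acc.length := pv_relax_length acc r hr
    simp only [List.foldl_cons]
    rw [ih (pvRelaxRow acc r) (by intro r' hr'; rw [hacc]; exact hlen r' (by simp [hr']))]
    rw [hacc]
    apply List.map_congr_left
    intro i hi
    have hi' : i < acc.length := List.mem_range.mp hi
    rw [pv_relax_getD acc r i hr hi']
    by_cases hir : i < r.length
    · simp [hir]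
    · simp [hir]

-- ===== VERDICT (by name: the statement is the Claim_ definition above) =====
theorem get_min_vec_from_data_set_spec : Claim_equal_get_min_vec_from_data_set := by
  intro mat_entries _ hpre
  obtain ⟨hne, hlen⟩ := hpre
  match mat_entries, hne with
  | r0 :: rest, _ =>
    simp only [List.headD_cons] at hlen
    unfold Spec_get_min_vec_from_data_set get_min_vec_from_data_set get_min_vec_from_data_set_alt
    simp only [List.headD_cons, PySem.List.foldl_append_singleton, List.nil_append]
    rw [pv_foldA_cols (r0 :: rest) r0 hlen]
    apply List.map_congr_left
    intro i hi
    have hi' : i < r0.length := List.mem_range.mp hi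
    simp [hi', pvColMin]

@[simp]
theorem get_min_vec_from_data_set_raises : Claim_raises_get_min_vec_from_data_set := by
  unfold Claim_raises_get_min_vec_from_data_set
  refine ⟨?_, by decide⟩
  intro m _ hraise hpre
  obtain ⟨hne, hlen⟩ := hpre
  obtain ⟨_, r, hr, hlt⟩ := hraise
  have := hlen r hr
  omega
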